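-- pv_equiv track=rewrite | github.com/shafi-fiqh/inheritance | app/utils/sort_heirs.py | order_dict_by_inhs
-- ===== SOURCE A (Python) =====
-- def order_dict_by_inhs(inh_dict: dict) -> dict:
--     # Determine the first key ('husband' or 'wife')
--     first_key = next((key for key in ["husband", "wife"] if key in inh_dict), None)
--
--     # Separate the rest into fixed shares inheritors and universal heir inheritors
--     fixed_inh = {
--         key: value
--         for key, value in inh_dict.items()
--         if key != first_key and value != "U"
--     }
--     universal_inh = {key: value for key, value in inh_dict.items() if value == "U"}
--
--     # Construct the ordered dictionary
--     ordered_dict = {}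
--     if first_key:
--         ordered_dict[first_key] = inh_dict[first_key]
--     ordered_dict.update(fixed_inh)
--     ordered_dict.update(universal_inh)
--
--     return ordered_dict
-- ===== SOURCE B (Python) =====
-- def order_dict_by_inhs(inh_dict: dict) -> dict:
--     # Determine the first key ('husband' or 'wife')
--     first_key = next((key for key in ["husband", "wife"] if key in inh_dict), None)
--
--     # Stable sort the items by group rank: spouse first, fixed shares, then
--     # universal heirs; stability keeps first-seen order inside each group.
--     def rank(item):
--         key, value = item
--         if key == first_key:
--             return 0
--         if value == "U":
--             return 2
--         return 1
--
--     return dict(sorted(inh_dict.items(), key=rank))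
-- ===== Notes on version B (the rewrite author's own statement) =====
-- stated objective: alternative
-- what changed: Replaces A's two dict comprehensions plus three dict-update passes by a single stable sort of the items under a 3-valued rank key (spouse=0, fixed=1, universal=2); stability of Python's sort preserves first-seen order within each group.
import Mathlib
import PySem

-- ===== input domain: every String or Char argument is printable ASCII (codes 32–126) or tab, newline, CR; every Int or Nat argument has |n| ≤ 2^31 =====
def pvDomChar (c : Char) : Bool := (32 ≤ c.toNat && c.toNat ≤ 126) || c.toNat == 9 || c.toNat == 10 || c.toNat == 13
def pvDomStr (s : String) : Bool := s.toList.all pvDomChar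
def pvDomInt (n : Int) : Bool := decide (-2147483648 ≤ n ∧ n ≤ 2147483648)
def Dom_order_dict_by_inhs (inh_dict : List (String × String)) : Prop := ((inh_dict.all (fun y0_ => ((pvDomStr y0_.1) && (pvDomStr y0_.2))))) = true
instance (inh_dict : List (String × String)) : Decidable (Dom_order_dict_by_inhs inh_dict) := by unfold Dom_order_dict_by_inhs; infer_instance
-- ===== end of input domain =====

-- B replaces A's two dict comprehensions + dict-update assembly by ONE stable sort of the
-- items under a 3-valued rank key (spouse=0, fixed=1, universal=2); objective: alternative.

-- ===== PORT A =====
-- first_key = next((key for key in ["husband", "wife"] if key in inh_dict), None)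
-- (this line is shared verbatim by A and B, so it is a shared helper)
def pvFirstKey (inh_dict : List (String × String)) : Option String :=
  (["husband", "wife"]).find? (fun k => inh_dict.any (fun p => p.1 == k))

def order_dict_by_inhs (inh_dict : List (String × String)) : List (String × String) :=
  let first_key := pvFirstKey inh_dict
  -- dict comprehensions over inh_dict.items() (keys unique under Pre_, so a dict
  -- comprehension is the filtered item list)
  let fixed_inh : List (String × String) :=
    inh_dict.filter (fun p => (some p.1 != first_key) && (p.2 != "U"))
  let universal_inh : List (String × String) :=
    inh_dict.filter (fun p => p.2 == "U")
  -- ordered_dict = {}; if first_key: ordered_dict[first_key] = inh_dict[first_key]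
  -- ("husband"/"wife" are nonempty, so `if first_key:` is `first_key is not None`;
  --  first_key is a key of inh_dict, so get? is some and the default "" is unreachable)
  let ordered0 : PySem.Dict String String :=
    match first_key with
    | some fk => (PySem.Dict.empty).insert fk (((PySem.Dict.mk inh_dict).get? fk).getD "")
    | none => PySem.Dict.empty
  -- ordered_dict.update(fixed_inh); ordered_dict.update(universal_inh)
  let d1 := fixed_inh.foldl (fun d p => d.insert p.1 p.2) ordered0
  let d2 := universal_inh.foldl (fun d p => d.insert p.1 p.2) d1
  d2.items

-- ===== PORT B =====
-- def rank(item): key,value = item; 0 if key == first_key, 2 if value == "U", else 1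
def pvRank (first_key : Option String) (item : String × String) : Int :=
  if some item.1 == first_key then 0 else if item.2 == "U" then 2 else 1

def order_dict_by_inhs_alt (inh_dict : List (String × String)) : List (String × String) :=
  let first_key := pvFirstKey inh_dict
  -- dict(sorted(inh_dict.items(), key=rank)) — items have unique keys under Pre_,
  -- so dict(...) of the sorted item list is that list
  PySem.List.sorted inh_dict (pvRank first_key)

-- ===== PRECONDITION & SPEC =====
-- Pre_ requires pairwise-distinct keys: the Python argument is a dict, whose items are
-- unique by construction, so association lists with duplicate keys correspond to no
-- Python input at all (nothing A returns on is excluded).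
def Pre_order_dict_by_inhs (inh_dict : List (String × String)) : Prop :=
  (inh_dict.map Prod.fst).Nodup
instance (inh_dict : List (String × String)) : Decidable (Pre_order_dict_by_inhs inh_dict) := by
  unfold Pre_order_dict_by_inhs; infer_instance
def pvWitness_order_dict_by_inhs : (List (String × String)) :=
  [("son", "U"), ("wife", "1/8"), ("mother", "1/6")]

def Spec_order_dict_by_inhs (inh_dict : List (String × String)) (out : List (String × String)) : Prop := out = order_dict_by_inhs_alt inh_dict
instance (inh_dict : List (String × String)) (out : List (String × String)) : Decidable (Spec_order_dict_by_inhs inh_dict out) := by unfold Spec_order_dict_by_inhs; infer_instance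

-- ===== CLAIM (what is proved, stated in full; the proofs are below) =====
def Claim_equal_order_dict_by_inhs : Prop := ∀ (inh_dict : List (String × String)), Dom_order_dict_by_inhs inh_dict → Pre_order_dict_by_inhs inh_dict → Spec_order_dict_by_inhs inh_dict (order_dict_by_inhs inh_dict)

-- ===== LEMMAS AND PROOFS =====

-- keys-Nodup makes the key a primary key: equal keys ⇒ equal entries
theorem pv_key_inj {l : List (String × String)} (hnd : (l.map Prod.fst).Nodup)
    {p q : String × String} (hp : p ∈ l) (hq : q ∈ l) (h : p.1 = q.1) : p = q :=
  List.inj_on_of_nodup_map hnd hp hq h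

theorem pv_filter_map_nodup (l : List (String × String)) (P : String × String → Bool)
    (hnd : (l.map Prod.fst).Nodup) : ((l.filter P).map Prod.fst).Nodup :=
  hnd.sublist ((List.filter_sublist (p := P) (l := l)).map Prod.fst)

-- insertBy drops x exactly between a 'not before' prefix and a 'before' suffix
theorem pv_insertBy_mid {α : Type} (before : α → α → Bool) (x : α) (ys zs : List α)
    (hys : ∀ y ∈ ys, before x y = false)
    (hzs : ∀ z, zs.head? = some z → before x z = true) :
    PySem.List.insertBy before x (ys ++ zs) = ys ++ x :: zs := by
  induction ys with
  | nil =>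
      cases zs with
      | nil => rfl
      | cons z rest =>
          have hz : before x z = true := hzs z rfl
          show (if before x z then x :: z :: rest else z :: PySem.List.insertBy before x rest)
            = x :: z :: rest
          rw [if_pos hz]
  | cons y ys ih =>
      have hy : before x y = false := hys y (by simp)
      show (if before x y then x :: y :: (ys ++ zs)
            else y :: PySem.List.insertBy before x (ys ++ zs)) = y :: (ys ++ x :: zs)
      rw [if_neg (by simp [hy]), ih (fun y' hy' => hys y' (List.mem_cons_of_mem _ hy'))]

-- the insertion-sort fold under a 3-valued rank key is the three rank groups in order
theorem pv_fold_insert3 {α : Type} (r : α → Int)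
    (hr : ∀ x, r x = 0 ∨ r x = 1 ∨ r x = 2) (l : List α) :
    ∀ (g0 g1 g2 : List α),
    (∀ x ∈ g0, r x = 0) → (∀ x ∈ g1, r x = 1) → (∀ x ∈ g2, r x = 2) →
    l.foldl (fun acc x => PySem.List.insertBy (fun a b => decide (r a < r b)) x acc)
      (g0 ++ (g1 ++ g2))
    = (g0 ++ l.filter (fun x => r x == 0)) ++
      ((g1 ++ l.filter (fun x => r x == 1)) ++ (g2 ++ l.filter (fun x => r x == 2))) := by
  induction l with
  | nil => intro g0 g1 g2 _ _ _; simp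
  | cons x l ih =>
      intro g0 g1 g2 h0 h1 h2
      simp only [List.foldl_cons, List.filter_cons]
      rcases hr x with hx | hx | hx
      · -- rank 0: x goes to the end of g0
        have hins : PySem.List.insertBy (fun a b => decide (r a < r b)) x (g0 ++ (g1 ++ g2))
            = g0 ++ x :: (g1 ++ g2) := by
          apply pv_insertBy_mid
          · intro y hy; simp [hx, h0 y hy]
          · intro z hz
            have hzm : z ∈ g1 ++ g2 := List.mem_of_mem_head? hz
            rcases List.mem_append.1 hzm with h | h
            · simp [hx, h1 z h]
            · simp [hx, h2 z h]
        rw [hins]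
        have : g0 ++ x :: (g1 ++ g2) = (g0 ++ [x]) ++ (g1 ++ g2) := by simp
        rw [this, ih (g0 ++ [x]) g1 g2
          (by intro y hy; rcases List.mem_append.1 hy with h | h
              · exact h0 y h
              · rw [List.mem_singleton.1 h]; exact hx) h1 h2]
        simp [hx]
      · -- rank 1: x goes to the end of g1
        have hassoc : g0 ++ (g1 ++ g2) = (g0 ++ g1) ++ g2 := by simp
        have hins : PySem.List.insertBy (fun a b => decide (r a < r b)) x ((g0 ++ g1) ++ g2)
            = (g0 ++ g1) ++ x :: g2 := by
          apply pv_insertBy_mid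
          · intro y hy
            rcases List.mem_append.1 hy with h | h
            · simp [hx, h0 y h]
            · simp [hx, h1 y h]
          · intro z hz
            have hzm : z ∈ g2 := List.mem_of_mem_head? hz
            simp [hx, h2 z hzm]
        rw [hassoc, hins]
        have : (g0 ++ g1) ++ x :: g2 = g0 ++ ((g1 ++ [x]) ++ g2) := by simp
        rw [this, ih g0 (g1 ++ [x]) g2 h0
          (by intro y hy; rcases List.mem_append.1 hy with h | h
              · exact h1 y h
              · rw [List.mem_singleton.1 h]; exact hx) h2]
        simp [hx]
      · -- rank 2: x goes to the very end
        have hins : PySem.List.insertBy (fun a b => decide (r a < r b)) x (g0 ++ (g1 ++ g2))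
            = (g0 ++ (g1 ++ g2)) ++ [x] := by
          apply PySem.List.insertBy_of_forall_not_before
          intro y hy
          rcases List.mem_append.1 hy with h | h
          · simp [hx, h0 y h]
          · rcases List.mem_append.1 h with h' | h'
            · simp [hx, h1 y h']
            · simp [hx, h2 y h']
        rw [hins]
        have : (g0 ++ (g1 ++ g2)) ++ [x] = g0 ++ (g1 ++ (g2 ++ [x])) := by simp
        rw [this, ih g0 g1 (g2 ++ [x]) h0 h1
          (by intro y hy; rcases List.mem_append.1 hy with h | h
              · exact h2 y h
              · rw [List.mem_singleton.1 h]; exact hx)]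
        simp [hx]

-- B is the three filter groups: spouse entries, fixed shares, universal heirs, in order
theorem pv_alt_eq (l : List (String × String)) :
    order_dict_by_inhs_alt l
    = l.filter (fun p => some p.1 == pvFirstKey l) ++
      (l.filter (fun p => (some p.1 != pvFirstKey l) && (p.2 != "U")) ++
       l.filter (fun p => (some p.1 != pvFirstKey l) && (p.2 == "U"))) := by
  unfold order_dict_by_inhs_alt
  dsimp only
  rw [PySem.List.sorted_eq_foldl_insertBy]
  have h3 : ∀ x, pvRank (pvFirstKey l) x = 0 ∨ pvRank (pvFirstKey l) x = 1 ∨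
      pvRank (pvFirstKey l) x = 2 := by
    intro x; unfold pvRank; split_ifs <;> simp
  have := pv_fold_insert3 (pvRank (pvFirstKey l)) h3 l [] [] []
    (by simp) (by simp) (by simp)
  simp only [List.nil_append, List.append_nil] at this
  rw [this]
  congr 1
  · apply List.filter_congr
    intro p _
    unfold pvRank; split_ifs with h1 h2 <;> simp_all
  congr 1
  · apply List.filter_congr
    intro p _
    unfold pvRank; split_ifs with h1 h2 <;> simp_all
  · apply List.filter_congr
    intro p _
    unfold pvRank; split_ifs with h1 h2 <;> simp_all

-- inserting an already present binding is a no-op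
theorem pv_insert_mem {d : PySem.Dict String String} (hnd : d.keys.Nodup)
    {k v : String} (h : (k, v) ∈ d.items) : d.insert k v = d := by
  apply PySem.Dict.ext
  have hc : d.contains k = true :=
    (PySem.Dict.contains_iff_mem_keys d k).2 (PySem.Dict.mem_keys_of_mem_items d h)
  rw [PySem.Dict.items_insert_of_contains _ _ hc]
  have hcongr : ∀ q ∈ d.items, (if q.1 == k then (k, v) else q) = q := by
    rintro ⟨q1, q2⟩ hq
    by_cases hqk : (q1 == k) = true
    · have hq1 : q1 = k := by simpa using hqk
      have h2 : d.get? q1 = some q2 := PySem.Dict.get?_of_mem_items _ hq hnd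
      have hk : d.get? k = some v := PySem.Dict.get?_of_mem_items _ h hnd
      rw [hq1, hk] at h2
      have hv : v = q2 := by injection h2
      simp [hq1, hv]
    · simp [hqk]
  rw [List.map_congr_left hcongr]
  simp

-- the update loop: overwrites of identical bindings vanish, fresh keys append
theorem pv_fold_update (us : List (String × String)) (d : PySem.Dict String String)
    (hnd : d.keys.Nodup) (hus : (us.map Prod.fst).Nodup)
    (hagree : ∀ p ∈ us, ∀ v, d.get? p.1 = some v → v = p.2) :
    (us.foldl (fun d p => d.insert p.1 p.2) d).items
      = d.items ++ us.filter (fun p => !(d.contains p.1)) := by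
  induction us generalizing d with
  | nil => simp
  | cons p us ih =>
      have hus' : (us.map Prod.fst).Nodup := by
        simp only [List.map_cons, List.nodup_cons] at hus; exact hus.2
      by_cases hc : d.contains p.1 = true
      · -- overwrite in place with the identical value: a no-op
        have hg : (d.get? p.1).isSome := by
          rw [← PySem.Dict.contains_eq_isSome_get?]; exact hc
        obtain ⟨v, hv⟩ := Option.isSome_iff_exists.1 hg
        have hvp : v = p.2 := hagree p (by simp) v hv
        subst hvp
        have hmem : (p.1, p.2) ∈ d.items := PySem.Dict.mem_items_of_get?_eq_some _ hv
        have hnoop : d.insert p.1 p.2 = d := pv_insert_mem hnd hmem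
        simp only [List.foldl_cons, List.filter_cons, hnoop, hc, Bool.not_true]
        rw [if_neg (by simp)]
        exact ih d hnd hus' (fun q hq v hv' => hagree q (List.mem_cons_of_mem _ hq) v hv')
      · -- fresh key: append
        have hc' : d.contains p.1 = false := by simpa using hc
        have hitems : (d.insert p.1 p.2).items = d.items ++ [(p.1, p.2)] :=
          PySem.Dict.items_insert_of_not_contains (h := hc') _ _
        have hnd' : (d.insert p.1 p.2).keys.Nodup := PySem.Dict.nodup_keys_insert _ _ _ hnd
        have hkey : ∀ q ∈ us, q.1 ≠ p.1 := by
          intro q hq hqe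
          simp only [List.map_cons, List.nodup_cons] at hus
          exact hus.1 (hqe ▸ List.mem_map_of_mem hq)
        have hagree' : ∀ q ∈ us, ∀ v, (d.insert p.1 p.2).get? q.1 = some v → v = q.2 := by
          intro q hq v hv
          rw [PySem.Dict.get?_insert_of_ne (hne := hkey q hq)] at hv
          exact hagree q (List.mem_cons_of_mem _ hq) v hv
        have hfil : us.filter (fun q => !((d.insert p.1 p.2).contains q.1))
            = us.filter (fun q => !(d.contains q.1)) := by
          apply List.filter_congr
          intro q hq
          rw [PySem.Dict.contains_insert]
          simp [hkey q hq]
        simp only [List.foldl_cons, List.filter_cons, hc', Bool.not_false]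
        rw [if_pos (by simp), ih (d.insert p.1 p.2) hnd' hus' hagree', hitems, hfil]
        simp

-- under Nodup keys, the entries carrying key k are exactly the dict lookup
theorem pv_filter_key (l : List (String × String)) (k : String)
    (hnd : (l.map Prod.fst).Nodup) (hany : l.any (fun p => p.1 == k) = true) :
    l.filter (fun p => p.1 == k) = [(k, ((PySem.Dict.mk l).get? k).getD "")] := by
  induction l with
  | nil => simp at hany
  | cons a l ih =>
      rw [PySem.Dict.get?_mk_cons]
      by_cases hak : (a.1 == k) = true
      · have hak' : a.1 = k := by simpa using hak
        have hnot : ∀ q ∈ l, ¬((fun p => p.1 == k) q = true) := by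
          intro q hq hqk
          simp only [List.map_cons, List.nodup_cons] at hnd
          apply hnd.1
          have hq1 : q.1 = k := by simpa using hqk
          rw [hak', ← hq1]
          exact List.mem_map_of_mem hq
        rw [List.filter_cons_of_pos (p := fun p => p.1 == k) (l := l) hak, List.filter_eq_nil_iff.2 hnot]
        simp [← hak']
      · have hl : l.any (fun p => p.1 == k) = true := by
          simp only [List.any_cons, Bool.or_eq_true] at hany
          rcases hany with h | h
          · exact absurd h hak
          · exact h
        have hnd' : (l.map Prod.fst).Nodup := by
          simp only [List.map_cons, List.nodup_cons] at hnd; exact hnd.2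
        rw [List.filter_cons_of_neg (p := fun p => p.1 == k) (l := l) hak, ih hnd' hl]
        simp [hak]

theorem pv_keys_eq (d : PySem.Dict String String) : d.keys = d.items.map Prod.fst := rfl

theorem pv_contains_iff (d : PySem.Dict String String) (x : String) :
    d.contains x = true ↔ x ∈ d.items.map Prod.fst := by
  rw [PySem.Dict.contains_iff_mem_keys, pv_keys_eq]

-- a dict whose entries all come from a Nodup-keyed list agrees with that list
theorem pv_agree_of_sub (l : List (String × String)) (hnd : (l.map Prod.fst).Nodup)
    (d : PySem.Dict String String) (hsub : ∀ q ∈ d.items, q ∈ l) :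
    ∀ p, p ∈ l → ∀ v, d.get? p.1 = some v → v = p.2 := by
  intro p hp v hv
  have hm : (p.1, v) ∈ d.items := PySem.Dict.mem_items_of_get?_eq_some _ hv
  have hml : (p.1, v) ∈ l := hsub _ hm
  have := pv_key_inj hnd hp hml rfl
  exact (congrArg Prod.snd this).symm

-- ===== VERDICT (by name: the statement is the Claim_ definition above) =====
theorem order_dict_by_inhs_spec : Claim_equal_order_dict_by_inhs := by
  intro l _ hnd
  unfold Pre_order_dict_by_inhs at hnd
  unfold Spec_order_dict_by_inhs order_dict_by_inhs
  rw [pv_alt_eq]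
  dsimp only
  cases hE : pvFirstKey l with
  | none =>
      dsimp only
      have hn1 : ((l.filter (fun p => some p.1 != (none : Option String) && p.2 != "U")).map Prod.fst).Nodup :=
        pv_filter_map_nodup l _ hnd
      have hn2 : ((l.filter (fun p => p.2 == "U")).map Prod.fst).Nodup :=
        pv_filter_map_nodup l _ hnd
      have hk0 : (PySem.Dict.empty : PySem.Dict String String).keys.Nodup := by
        simp [PySem.Dict.empty]
      have hsub0 : ∀ q ∈ (PySem.Dict.empty : PySem.Dict String String).items, q ∈ l := by
        simp [PySem.Dict.empty]
      have hinner :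
          ((l.filter (fun p => some p.1 != (none : Option String) && p.2 != "U")).foldl
            (fun d p => d.insert p.1 p.2) PySem.Dict.empty).items
          = l.filter (fun p => some p.1 != (none : Option String) && p.2 != "U") := by
        rw [pv_fold_update _ _ hk0 hn1
          (fun p hp v hv => pv_agree_of_sub l hnd _ hsub0 p (List.mem_of_mem_filter hp) v hv)]
        simp [PySem.Dict.empty, PySem.Dict.contains]
      have hkeys1 :
          ((l.filter (fun p => some p.1 != (none : Option String) && p.2 != "U")).foldl
            (fun d p => d.insert p.1 p.2) PySem.Dict.empty).keys.Nodup := by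
        rw [pv_keys_eq, hinner]; exact hn1
      have hsub1 : ∀ q ∈ ((l.filter (fun p => some p.1 != (none : Option String) && p.2 != "U")).foldl
            (fun d p => d.insert p.1 p.2) PySem.Dict.empty).items, q ∈ l := by
        rw [hinner]; exact fun q hq => List.mem_of_mem_filter hq
      rw [pv_fold_update _ _ hkeys1 hn2
        (fun p hp v hv => pv_agree_of_sub l hnd _ hsub1 p (List.mem_of_mem_filter hp) v hv), hinner]
      have hfil : (l.filter (fun p => p.2 == "U")).filter
            (fun p => !(((l.filter (fun p => some p.1 != (none : Option String) && p.2 != "U")).foldl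
              (fun d p => d.insert p.1 p.2) PySem.Dict.empty).contains p.1))
          = l.filter (fun p => some p.1 != (none : Option String) && p.2 == "U") := by
        rw [List.filter_filter]
        apply List.filter_congr
        intro p hp
        by_cases hU : (p.2 == "U") = true
        · have hU' : p.2 = "U" := by simpa using hU
          have hpc : ¬ (((l.filter (fun p => some p.1 != (none : Option String) && p.2 != "U")).foldl
              (fun d p => d.insert p.1 p.2) PySem.Dict.empty).contains p.1 = true) := by
            intro hct
            have hmk : p.1 ∈ ((l.filter (fun p => some p.1 != (none : Option String) && p.2 != "U")).foldl
              (fun d p => d.insert p.1 p.2) PySem.Dict.empty).items.map Prod.fst :=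
              (pv_contains_iff _ _).1 hct
            rw [hinner] at hmk
            obtain ⟨q, hq, hq1⟩ := List.mem_map.1 hmk
            have hql : q ∈ l := List.mem_of_mem_filter hq
            have hqp : q = p := pv_key_inj hnd hql hp hq1
            have := (List.mem_filter.1 hq).2
            rw [hqp] at this
            simp [hU'] at this
          have hpc' := Bool.eq_false_iff.2 hpc
          simp [hU', hpc']
        · have hU2 : (p.2 == "U") = false := by simpa using hU
          simp [hU2]
      rw [hfil]
      simp
  | some k =>
      dsimp only
      have hany : l.any (fun p => p.1 == k) = true := by
        unfold pvFirstKey at hE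
        exact List.find?_some (p := fun k => l.any fun p => p.1 == k) hE
      have hfk : l.filter (fun p => p.1 == k) = [(k, ((PySem.Dict.mk l).get? k).getD "")] :=
        pv_filter_key l k hnd hany
      have hmem : (k, ((PySem.Dict.mk l).get? k).getD "") ∈ l := by
        have : (k, ((PySem.Dict.mk l).get? k).getD "") ∈ l.filter (fun p => p.1 == k) := by
          rw [hfk]; simp
        exact List.mem_of_mem_filter this
      have hord : ((PySem.Dict.empty : PySem.Dict String String).insert k
            (((PySem.Dict.mk l).get? k).getD "")).items = [(k, ((PySem.Dict.mk l).get? k).getD "")] := by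
        rw [PySem.Dict.items_insert_of_not_contains (h := by simp [PySem.Dict.contains, PySem.Dict.empty]) _ _]
        simp [PySem.Dict.empty]
      have hn1 : ((l.filter (fun p => some p.1 != some k && p.2 != "U")).map Prod.fst).Nodup :=
        pv_filter_map_nodup l _ hnd
      have hn2 : ((l.filter (fun p => p.2 == "U")).map Prod.fst).Nodup :=
        pv_filter_map_nodup l _ hnd
      have hnotk : ∀ q ∈ l.filter (fun p => some p.1 != some k && p.2 != "U"), q.1 ≠ k := by
        intro q hq
        have := (List.mem_filter.1 hq).2
        simp at this
        exact this.1
      have hk0 : ((PySem.Dict.empty : PySem.Dict String String).insert k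
            (((PySem.Dict.mk l).get? k).getD "")).keys.Nodup := by
        rw [pv_keys_eq, hord]; simp
      have hsub0 : ∀ q ∈ ((PySem.Dict.empty : PySem.Dict String String).insert k
            (((PySem.Dict.mk l).get? k).getD "")).items, q ∈ l := by
        rw [hord]
        intro q hq
        rw [List.mem_singleton.1 hq]
        exact hmem
      have hinner :
          ((l.filter (fun p => some p.1 != some k && p.2 != "U")).foldl
            (fun d p => d.insert p.1 p.2)
            ((PySem.Dict.empty : PySem.Dict String String).insert k (((PySem.Dict.mk l).get? k).getD ""))).items
          = (k, ((PySem.Dict.mk l).get? k).getD "") :: l.filter (fun p => some p.1 != some k && p.2 != "U") := by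
        rw [pv_fold_update _ _ hk0 hn1
          (fun p hp v hv => pv_agree_of_sub l hnd _ hsub0 p (List.mem_of_mem_filter hp) v hv), hord]
        have : (l.filter (fun p => some p.1 != some k && p.2 != "U")).filter
              (fun p => !(((PySem.Dict.empty : PySem.Dict String String).insert k
                (((PySem.Dict.mk l).get? k).getD "")).contains p.1))
            = l.filter (fun p => some p.1 != some k && p.2 != "U") := by
          apply List.filter_eq_self.2
          intro q hq
          have hqk := hnotk q hq
          simp only [Bool.not_eq_eq_eq_not, Bool.not_true]
          rw [← Bool.not_eq_true]
          intro hct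
          have := (pv_contains_iff _ _).1 hct
          rw [hord] at this
          simp at this
          exact hqk this
        rw [this]
        simp
      have hkeys1 :
          ((l.filter (fun p => some p.1 != some k && p.2 != "U")).foldl
            (fun d p => d.insert p.1 p.2)
            ((PySem.Dict.empty : PySem.Dict String String).insert k (((PySem.Dict.mk l).get? k).getD ""))).keys.Nodup := by
        rw [pv_keys_eq, hinner]
        simp only [List.map_cons, List.nodup_cons]
        constructor
        · intro hkmem
          obtain ⟨q, hq, hq1⟩ := List.mem_map.1 hkmem
          exact hnotk q hq hq1
        · exact hn1
      have hsub1 : ∀ q ∈ ((l.filter (fun p => some p.1 != some k && p.2 != "U")).foldl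
            (fun d p => d.insert p.1 p.2)
            ((PySem.Dict.empty : PySem.Dict String String).insert k (((PySem.Dict.mk l).get? k).getD ""))).items, q ∈ l := by
        rw [hinner]
        intro q hq
        rcases List.mem_cons.1 hq with h | h
        · rw [h]; exact hmem
        · exact List.mem_of_mem_filter h
      rw [pv_fold_update _ _ hkeys1 hn2
        (fun p hp v hv => pv_agree_of_sub l hnd _ hsub1 p (List.mem_of_mem_filter hp) v hv), hinner]
      have hfil : (l.filter (fun p => p.2 == "U")).filter
            (fun p => !(((l.filter (fun p => some p.1 != some k && p.2 != "U")).foldl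
              (fun d p => d.insert p.1 p.2)
              ((PySem.Dict.empty : PySem.Dict String String).insert k (((PySem.Dict.mk l).get? k).getD ""))).contains p.1))
          = l.filter (fun p => some p.1 != some k && p.2 == "U") := by
        rw [List.filter_filter]
        apply List.filter_congr
        intro p hp
        by_cases hU : (p.2 == "U") = true
        · have hU' : p.2 = "U" := by simpa using hU
          by_cases hpk : p.1 = k
          · have hct : ((l.filter (fun p => some p.1 != some k && p.2 != "U")).foldl
                (fun d p => d.insert p.1 p.2)
                ((PySem.Dict.empty : PySem.Dict String String).insert k (((PySem.Dict.mk l).get? k).getD ""))).contains k = true := by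
              apply (pv_contains_iff _ _).2
              rw [hinner]
              simp
            simp [hU', hpk, hct]
          · have hct : ¬ (((l.filter (fun p => some p.1 != some k && p.2 != "U")).foldl
                (fun d p => d.insert p.1 p.2)
                ((PySem.Dict.empty : PySem.Dict String String).insert k (((PySem.Dict.mk l).get? k).getD ""))).contains p.1 = true) := by
              intro hct
              have := (pv_contains_iff _ _).1 hct
              rw [hinner] at this
              simp only [List.map_cons, List.mem_cons] at this
              rcases this with h | h
              · exact hpk h
              · obtain ⟨q, hq, hq1⟩ := List.mem_map.1 h
                have hql : q ∈ l := List.mem_of_mem_filter hq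
                have hqp : q = p := pv_key_inj hnd hql hp hq1
                have := (List.mem_filter.1 hq).2
                rw [hqp] at this
                simp [hU'] at this
            have hct' := Bool.eq_false_iff.2 hct
            simp [hU', hct', hpk]
        · have hU2 : (p.2 == "U") = false := by simpa using hU
          simp [hU2]
      rw [hfil]
      have hhead : l.filter (fun p => some p.1 == some k) = l.filter (fun p => p.1 == k) := by
        apply List.filter_congr
        intro p _
        simp
      rw [hhead, hfk]
      simp
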